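-- pv_equiv track=rewrite | github.com/cea-sec/miasm | miasm/arch/arm/arch.py | reglist2str
-- ===== SOURCE A (Python) =====
-- from builtins import range
--
-- regs_str = ['R%d' % r for r in range(0x10)]
--
-- def reglist2str(rlist):
--     out = []
--     i = 0
--     while i < len(rlist):
--         j = i + 1
--         while j < len(rlist) and rlist[j] < 13 and rlist[j] == rlist[j - 1] + 1:
--             j += 1
--         j -= 1
--         if j < i + 2:
--             out.append(regs_str[rlist[i]])
--             i += 1
--         else:
--             out.append(regs_str[rlist[i]] + '-' + regs_str[rlist[j]])
--             i = j + 1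
--     return "{" + ", ".join(out) + '}'
-- ===== SOURCE B (Python) =====
-- regs_str = ['R%d' % r for r in range(0x10)]
--
-- def _runs(rlist):
--     # grouping pass over reversed(rlist): r joins the run in front of it when that
--     # run starts with r + 1 and that start is < 13; otherwise r opens a new run
--     runs = []
--     for r in reversed(rlist):
--         if runs and runs[0][0] == r + 1 and runs[0][0] < 13:
--             runs[0] = [r] + runs[0]
--         else:
--             runs.insert(0, [r])
--     return runs
--
-- def _fmt(run):
--     # formatting pass: a run of length >= 3 becomes a range, shorter runs singletons
--     if len(run) >= 3:
--         return [regs_str[run[0]] + '-' + regs_str[run[-1]]]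
--     return [regs_str[r] for r in run]
--
-- def reglist2str(rlist):
--     parts = [s for run in _runs(rlist) for s in _fmt(run)]
--     return "{" + ", ".join(parts) + "}"
-- ===== Notes on version B (the rewrite author's own statement) =====
-- stated objective: alternative
-- what changed: Replaced A's interleaved index-based nested-while scan by a two-phase structure: a structural grouping pass that builds maximal runs (extend while next == prev+1 and next < 13), then a separate formatting pass mapping runs of length >= 3 to 'first-last' ranges and shorter runs to singletons.
import Mathlib
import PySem

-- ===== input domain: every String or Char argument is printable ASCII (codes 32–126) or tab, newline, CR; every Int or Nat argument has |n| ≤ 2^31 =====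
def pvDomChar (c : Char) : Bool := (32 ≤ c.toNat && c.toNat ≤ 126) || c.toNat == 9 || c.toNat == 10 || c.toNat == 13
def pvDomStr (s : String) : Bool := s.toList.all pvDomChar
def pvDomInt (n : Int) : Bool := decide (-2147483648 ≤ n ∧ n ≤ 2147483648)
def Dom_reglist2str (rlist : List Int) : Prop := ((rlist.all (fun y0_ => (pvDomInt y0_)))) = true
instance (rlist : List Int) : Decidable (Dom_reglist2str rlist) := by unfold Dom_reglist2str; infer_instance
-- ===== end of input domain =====

-- B replaces A's interleaved nested-while index scan with a build-runs-then-format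
-- two-phase decomposition (alternative structure, same cost); return values agree on Pre_.

-- ===== PORT A =====
-- regs_str = ['R%d' % r for r in range(0x10)]
def regsStr : List String :=
  ["R0","R1","R2","R3","R4","R5","R6","R7","R8","R9","R10","R11","R12","R13","R14","R15"]

-- regs_str[r]: Python indexing (negative wraps); the default is never used under Pre_
def regS (r : Int) : String := (PySem.List.pyGet? regsStr r).getD ""

-- inner while: advance j while j < len(rlist) and rlist[j] < 13 and rlist[j] == rlist[j-1] + 1
def innerA (rlist : List Int) (j : Nat) : Nat :=
  if h : j < rlist.length ∧
      PySem.List.pyGetD rlist (j : Int) 0 < 13 ∧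
      PySem.List.pyGetD rlist (j : Int) 0 = PySem.List.pyGetD rlist ((j : Int) - 1) 0 + 1
  then innerA rlist (j + 1)
  else j
termination_by rlist.length - j
decreasing_by omega

-- outer while over the index i, accumulating out (j -= 1 is fused into the let)
def loopA (rlist : List Int) (i : Nat) (out : List String) : List String :=
  if _hi : i < rlist.length then
    let j := innerA rlist (i + 1) - 1
    if _hj : j < i + 2 then
      loopA rlist (i + 1) (out ++ [regS (PySem.List.pyGetD rlist (i : Int) 0)])
    else
      loopA rlist (j + 1)
        (out ++ [regS (PySem.List.pyGetD rlist (i : Int) 0) ++ "-" ++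
                 regS (PySem.List.pyGetD rlist (j : Int) 0)])
  else out
termination_by rlist.length - i
decreasing_by all_goals omega

def reglist2str (rlist : List Int) : String :=
  "{" ++ PySem.Str.join ", " (loopA rlist 0 []) ++ "}"

-- ===== PORT B =====
-- grouping pass (Source B's loop over reversed(rlist), i.e. a foldr with body stepB):
-- r joins the run in front of it iff that run starts with r + 1 and that start is < 13
def stepB (r : Int) (rs : List (List Int)) : List (List Int) :=
  match rs with
  | (x :: xs) :: rest => if x = r + 1 ∧ x < 13 then (r :: x :: xs) :: rest else [r] :: (x :: xs) :: rest
  | _ => [r] :: rs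

def runsB (rlist : List Int) : List (List Int) := rlist.foldr stepB []

-- formatting pass: run[0]-run[-1] for a run of length >= 3, singletons otherwise
def fmtB (run : List Int) : List String :=
  if 3 ≤ run.length then
    [regS (PySem.List.pyGetD run 0 0) ++ "-" ++ regS (PySem.List.pyGetD run (-1) 0)]
  else run.map regS

def reglist2str_alt (rlist : List Int) : String :=
  "{" ++ PySem.Str.join ", " ((runsB rlist).flatMap fmtB) ++ "}"

-- ===== PRECONDITION & SPEC =====
-- Pre_ excludes exactly the inputs on which the Python raises IndexError (both A and B
-- index the 16-element regs_str with the raw value): every element must lie in [-16, 16).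
def Pre_reglist2str (rlist : List Int) : Prop := ∀ r ∈ rlist, -16 ≤ r ∧ r < 16
instance (rlist : List Int) : Decidable (Pre_reglist2str rlist) := by
  unfold Pre_reglist2str; infer_instance

def pvWitness_reglist2str : List Int := [0, 1, 2, 3]

def Spec_reglist2str (rlist : List Int) (out : String) : Prop := out = reglist2str_alt rlist
instance (rlist : List Int) (out : String) : Decidable (Spec_reglist2str rlist out) := by
  unfold Spec_reglist2str; infer_instance

-- ===== CLAIM (what is proved, stated in full; the proofs are below) =====
def Claim_equal_reglist2str : Prop :=
  ∀ (rlist : List Int), Dom_reglist2str rlist → Pre_reglist2str rlist →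
    Spec_reglist2str rlist (reglist2str rlist)

-- ===== LEMMAS AND PROOFS =====
def chain (prev : Int) : List Int → Nat
  | x :: xs => if x < 13 ∧ x = prev + 1 then chain x xs + 1 else 0
  | [] => 0

theorem pyGetD_nat_lt (rlist : List Int) (j : Nat) (h : j < rlist.length) :
    PySem.List.pyGetD rlist (j : Int) 0 = rlist[j] := by
  simp [PySem.List.pyGetD_natCast, h]

theorem innerA_eq (rlist : List Int) (j : Nat) : 0 < j → j ≤ rlist.length →
    innerA rlist j = j + chain (rlist.getD (j - 1) 0) (rlist.drop j) := by
  induction j using innerA.induct rlist with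
  | case1 j h ih =>
    intro hj0 hj
    obtain ⟨hlen, hlt, heq⟩ := h
    rw [innerA, dif_pos ⟨hlen, hlt, heq⟩, ih (by omega) hlen]
    have hx : PySem.List.pyGetD rlist (j : Int) 0 = rlist[j] := pyGetD_nat_lt _ _ hlen
    have hx1 : PySem.List.pyGetD rlist ((j : Int) - 1) 0 = rlist.getD (j - 1) 0 := by
      have : (j : Int) - 1 = ((j - 1 : Nat) : Int) := by omega
      rw [this, PySem.List.pyGetD_natCast]
    rw [hx] at hlt heq
    rw [hx1] at heq
    have hgj : rlist.getD (j + 1 - 1) 0 = rlist[j] := by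
      simp [List.getD_eq_getElem?_getD, hlen]
    rw [List.drop_eq_getElem_cons hlen, hgj]
    simp only [chain]
    rw [if_pos ⟨hlt, heq⟩]
    omega
  | case2 j h =>
    intro hj0 hj
    rw [innerA]
    simp only [h, dite_false]
    rcases Nat.lt_or_ge j rlist.length with hl | hl
    · rw [List.drop_eq_getElem_cons hl]
      have hx : PySem.List.pyGetD rlist (j : Int) 0 = rlist[j] := pyGetD_nat_lt _ _ hl
      have hx1 : PySem.List.pyGetD rlist ((j : Int) - 1) 0 = rlist.getD (j - 1) 0 := by
        have : (j : Int) - 1 = ((j - 1 : Nat) : Int) := by omega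
        rw [this, PySem.List.pyGetD_natCast]
      rw [hx, hx1] at h
      have : ¬(rlist[j] < 13 ∧ rlist[j] = rlist.getD (j - 1) 0 + 1) := by
        intro hc; exact h ⟨hl, hc.1, hc.2⟩
      simp only [chain, this, if_false]
      omega
    · rw [List.drop_eq_nil_of_le hl]
      simp [chain]

def partsS : List Int → List String
  | [] => []
  | x :: xs =>
    let k := chain x xs
    if k < 2 then regS x :: partsS xs
    else (regS x ++ "-" ++ regS (xs.getD (k - 1) 0)) :: partsS (xs.drop k)
termination_by l => l.length
decreasing_by all_goals (simp only [List.length_drop, List.length_cons]; omega)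

theorem chain_le_length (prev : Int) (xs : List Int) : chain prev xs ≤ xs.length := by
  induction xs generalizing prev with
  | nil => simp [chain]
  | cons x xs ih =>
    simp only [chain, List.length_cons]
    split
    · exact Nat.succ_le_succ (ih x)
    · omega

theorem loopA_eq (rlist : List Int) (i : Nat) (out : List String) (hi : i ≤ rlist.length) :
    loopA rlist i out = out ++ partsS (rlist.drop i) := by
  induction i, out using loopA.induct rlist with
  | case1 i out hlen j hj ih =>
    have hinner : innerA rlist (i + 1) = (i + 1) + chain (rlist.getD i 0) (rlist.drop (i + 1)) := by
      simpa using innerA_eq rlist (i + 1) (by omega) (by omega)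
    have hgi : rlist.getD i 0 = rlist[i] := by
      simp [List.getD_eq_getElem?_getD, hlen]
    rw [loopA, dif_pos hlen, dif_pos hj, ih (by omega)]
    rw [List.drop_eq_getElem_cons hlen, pyGetD_nat_lt rlist i hlen]
    have hc2 : chain rlist[i] (rlist.drop (i + 1)) < 2 := by
      rw [hgi] at hinner; omega
    conv_rhs => rw [partsS]
    simp only [hc2, if_true, List.append_assoc, List.singleton_append]
  | case2 i out hlen j hj ih =>
    have hinner : innerA rlist (i + 1) = (i + 1) + chain (rlist.getD i 0) (rlist.drop (i + 1)) := by
      simpa using innerA_eq rlist (i + 1) (by omega) (by omega)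
    have hgi : rlist.getD i 0 = rlist[i] := by
      simp [List.getD_eq_getElem?_getD, hlen]
    have hcl : chain (rlist.getD i 0) (rlist.drop (i + 1)) ≤ rlist.length - (i + 1) := by
      have := chain_le_length (rlist.getD i 0) (rlist.drop (i + 1))
      simpa using this
    have hj_eq : innerA rlist (i + 1) - 1 = i + chain rlist[i] (rlist.drop (i + 1)) := by
      rw [hgi] at hinner; omega
    have hlen2 : i + chain rlist[i] (rlist.drop (i + 1)) < rlist.length := by
      rw [hgi] at hcl hinner
      have hc2' : ¬ innerA rlist (i + 1) - 1 < i + 2 := hj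
      omega
    rw [loopA, dif_pos hlen, dif_neg hj, ih (by omega)]
    rw [List.drop_eq_getElem_cons hlen, pyGetD_nat_lt rlist i hlen]
    have hc2 : ¬ chain rlist[i] (rlist.drop (i + 1)) < 2 := by
      rw [hgi] at hinner; omega
    conv_rhs => rw [partsS]
    simp only [hc2, if_false]
    have hj' : j = i + chain rlist[i] (rlist.drop (i + 1)) := hj_eq
    have e1 : PySem.List.pyGetD rlist (j : Int) 0
        = (rlist.drop (i + 1)).getD (chain rlist[i] (rlist.drop (i + 1)) - 1) 0 := by
      rw [hj', pyGetD_nat_lt rlist _ hlen2]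
      rw [List.getD_eq_getElem?_getD, List.getElem?_drop]
      have harg : i + 1 + (chain rlist[i] (rlist.drop (i + 1)) - 1)
          = i + chain rlist[i] (rlist.drop (i + 1)) := by omega
      rw [harg, List.getElem?_eq_getElem hlen2]
      rfl
    have e2 : List.drop (j + 1) rlist
        = List.drop (chain rlist[i] (rlist.drop (i + 1))) (List.drop (i + 1) rlist) := by
      rw [List.drop_drop, hj']
      congr 1
      omega
    rw [e1, e2]
    simp
  | case3 i out hlen =>
    rw [loopA, dif_neg hlen]
    rw [List.drop_eq_nil_of_le (by omega)]
    simp [partsS]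

theorem runsB_cons (x : Int) (xs : List Int) :
    runsB (x :: xs) = (x :: xs.take (chain x xs)) :: runsB (xs.drop (chain x xs)) := by
  induction xs generalizing x with
  | nil => simp [runsB, stepB, chain]
  | cons y ys ih =>
    have step : runsB (x :: y :: ys) = stepB x (runsB (y :: ys)) := rfl
    rw [step, ih y]
    by_cases h : y < 13 ∧ y = x + 1
    · obtain ⟨h1, h2⟩ := h
      have hcx : chain x (y :: ys) = chain y ys + 1 := by
        simp only [chain]; rw [if_pos ⟨h1, h2⟩]
      rw [hcx]
      simp only [stepB]
      rw [if_pos ⟨h2, h1⟩]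
      rw [List.take_succ_cons, List.drop_succ_cons]
    · have hcx : chain x (y :: ys) = 0 := by
        simp only [chain]; rw [if_neg h]
      have hne : ¬ (y = x + 1 ∧ y < 13) := fun hc => h ⟨hc.2, hc.1⟩
      rw [hcx]
      simp only [stepB]
      rw [if_neg hne]
      simp only [List.take_zero, List.drop_zero]
      rw [← ih y]

theorem chain_one_destruct (x x0 : Int) (xs' : List Int) (h : chain x (x0 :: xs') = 1) :
    (x0 < 13 ∧ x0 = x + 1) ∧ chain x0 xs' = 0 := by
  by_cases hc : x0 < 13 ∧ x0 = x + 1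
  · refine ⟨hc, ?_⟩
    simp only [chain, if_pos hc] at h
    omega
  · simp only [chain, if_neg hc] at h; omega

theorem partsS_eq (l : List Int) : partsS l = (runsB l).flatMap fmtB := by
  generalize hn : l.length = n
  induction n using Nat.strong_induction_on generalizing l with
  | _ n ih =>
    match l with
    | [] => simp [partsS, runsB]
    | x :: xs =>
      rw [runsB_cons, List.flatMap_cons]
      have hkle : chain x xs ≤ xs.length := chain_le_length x xs
      rcases Nat.lt_or_ge (chain x xs) 2 with h2 | h2
      · interval_cases hck : chain x xs
        · rw [partsS]
          simp only [hck, if_pos (by omega : (0:Nat) < 2)]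
          rw [List.take_zero, List.drop_zero]
          have : partsS xs = (runsB xs).flatMap fmtB := ih xs.length (by simp at hn; omega) xs rfl
          rw [this]
          simp [fmtB]
        · match xs, hkle with
          | x0 :: xs', _ =>
            obtain ⟨hc, hc0⟩ := chain_one_destruct x x0 xs' hck
            rw [partsS]
            simp only [hck, if_pos (by omega : (1:Nat) < 2)]
            rw [partsS]
            simp only [hc0, if_pos (by omega : (0:Nat) < 2)]
            have : partsS xs' = (runsB xs').flatMap fmtB :=
              ih xs'.length (by simp at hn; omega) xs' rfl
            rw [this]
            simp [fmtB, List.take_succ_cons, List.take_zero, List.drop_succ_cons, List.drop_zero]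
      · rw [partsS]
        simp only [if_neg (by omega : ¬ chain x xs < 2)]
        have hlrun : (x :: xs.take (chain x xs)).length = chain x xs + 1 := by
          simp [List.length_take, Nat.min_eq_left hkle]
        have hfmt : fmtB (x :: xs.take (chain x xs))
            = [regS x ++ "-" ++ regS (xs.getD (chain x xs - 1) 0)] := by
          rw [fmtB, if_pos (by rw [hlrun]; omega)]
          rw [PySem.List.pyGetD_zero_cons]
          have hne : (x :: xs.take (chain x xs)) ≠ [] := by simp
          rw [PySem.List.pyGetD_neg_one _ _ hne]
          have hlast : (x :: xs.take (chain x xs)).getLast hne = xs.getD (chain x xs - 1) 0 := by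
            rw [List.getLast_eq_getElem]
            have hidx : (x :: xs.take (chain x xs)).length - 1 = chain x xs := by rw [hlrun]; omega
            have hk1 : chain x xs - 1 < xs.length := by omega
            simp only [hidx]
            have : (x :: xs.take (chain x xs))[chain x xs]'(by rw [hlrun]; omega)
                = (xs.take (chain x xs))[chain x xs - 1]'(by simp [List.length_take]; omega) := by
              have hc1 : chain x xs = (chain x xs - 1) + 1 := by omega
              rw [List.getElem_cons]
              split
              · omega
              · rfl
            rw [this, List.getElem_take]
            rw [List.getD_eq_getElem?_getD, List.getElem?_eq_getElem hk1]
            rfl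
          rw [hlast]
        rw [hfmt]
        have : partsS (xs.drop (chain x xs)) = (runsB (xs.drop (chain x xs))).flatMap fmtB :=
          ih (xs.drop (chain x xs)).length (by simp [List.length_drop] at *; omega) _ rfl
        rw [this]
        simp

-- ===== VERDICT (by name: the statement is the Claim_ definition above) =====
theorem reglist2str_spec : Claim_equal_reglist2str := by
  intro rlist _ _
  unfold Spec_reglist2str reglist2str reglist2str_alt
  rw [loopA_eq rlist 0 [] (Nat.zero_le _)]
  simp [partsS_eq]
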